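-- pv_equiv track=rewrite | github.com/naddot/AIM | aim-job/stages/sizes.py | parse_vehicle_split
-- ===== SOURCE A (Python) =====
-- def parse_vehicle_split(vehicle_str: str, known_makes: set):
--     """
--     Splits 'VAUXHALL GRANDLAND X' -> ('VAUXHALL', 'GRANDLAND X')
--     using the KNOWN_MAKES set.
--     """
--     v = str(vehicle_str or "").strip()
--     upper_v = v.upper()
--
--     # longest makes first to avoid partial matches
--     sorted_makes = sorted(list(known_makes), key=len, reverse=True)
--
--     best_make = "Unknown"
--     best_model = v
--
--     for make in sorted_makes:
--         if upper_v.startswith(make):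
--             best_make = make
--             remainder = v[len(make):].strip()
--             best_model = remainder
--             break
--
--     def to_title(s):
--         return " ".join([word.capitalize() for word in s.split()])
--
--     return to_title(best_make), to_title(best_model)
-- ===== SOURCE B (Python) =====
-- def parse_vehicle_split(vehicle_str: str, known_makes: set):
--     """Single unsorted pass keeping the longest known make that prefixes the string."""
--     v = str(vehicle_str or "").strip()
--     upper_v = v.upper()
--
--     best_make = "Unknown"
--     best_model = v
--     best_len = -1
--
--     for make in known_makes:
--         if len(make) > best_len and upper_v.startswith(make):
--             best_make = make
--             best_model = v[len(make):].strip()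
--             best_len = len(make)
--
--     def to_title(s):
--         return " ".join([word.capitalize() for word in s.split()])
--
--     return to_title(best_make), to_title(best_model)
-- ===== Notes on version B (the rewrite author's own statement) =====
-- stated objective: simpler
-- what changed: Replaced A's sort-by-length-descending-then-break-on-first-match with a single unsorted pass that keeps the strictly longest make prefixing the string (correct because two equal-length prefixes of the same string are identical).
import Mathlib
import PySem

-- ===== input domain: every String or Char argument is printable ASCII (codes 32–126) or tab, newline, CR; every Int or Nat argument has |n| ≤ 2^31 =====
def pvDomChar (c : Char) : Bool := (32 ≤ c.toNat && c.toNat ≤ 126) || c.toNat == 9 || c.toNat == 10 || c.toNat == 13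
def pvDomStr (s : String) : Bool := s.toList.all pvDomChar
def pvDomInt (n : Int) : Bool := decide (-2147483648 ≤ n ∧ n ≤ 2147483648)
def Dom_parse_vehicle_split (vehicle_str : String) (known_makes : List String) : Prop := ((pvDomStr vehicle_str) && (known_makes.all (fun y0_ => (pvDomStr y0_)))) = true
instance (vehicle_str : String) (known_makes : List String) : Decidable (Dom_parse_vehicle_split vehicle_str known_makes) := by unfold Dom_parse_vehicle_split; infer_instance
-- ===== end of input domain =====

-- B drops A's sort: one unsorted pass keeping the strictly longest matching make (simpler; equal-length prefixes of one string coincide, so the result is identical).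

-- shared helper of both sources: to_title(s) = " ".join(word.capitalize() for word in s.split())
def pvCapitalize (w : String) : String :=
  match w.toList with
  | [] => ""
  | c :: cs => String.ofList (PySem.Chars.upperChar c :: PySem.Chars.lower cs)

def pvToTitle (s : String) : String :=
  PySem.Str.join " " ((PySem.Str.split₀ s).map pvCapitalize)

-- ===== PORT A =====
-- the for-loop with break: first make (in sorted order) that prefixes upper_v
def pvFindMake (u v : String) : List String → String × String
  | [] => ("Unknown", v)
  | make :: rest =>
    if PySem.Str.startswith u make then
      (make, PySem.Str.strip (PySem.Str.slice v (some (PySem.Str.len make)) none))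
    else pvFindMake u v rest

def parse_vehicle_split (vehicle_str : String) (known_makes : List String) : String × String :=
  let v := PySem.Str.strip (if vehicle_str == "" then "" else vehicle_str)
  let upper_v := PySem.Str.upper v
  let sorted_makes := PySem.List.sorted known_makes (fun m => PySem.Str.len m) true
  let bb := pvFindMake upper_v v sorted_makes
  (pvToTitle bb.1, pvToTitle bb.2)

-- ===== PORT B =====
-- loop body of Source B: state (best_make, best_model, best_len)
def pvStep (u v : String) (st : String × String × Int) (make : String) : String × String × Int :=
  if st.2.2 < PySem.Str.len make ∧ PySem.Str.startswith u make = true then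
    (make, PySem.Str.strip (PySem.Str.slice v (some (PySem.Str.len make)) none), PySem.Str.len make)
  else st

def parse_vehicle_split_alt (vehicle_str : String) (known_makes : List String) : String × String :=
  let v := PySem.Str.strip (if vehicle_str == "" then "" else vehicle_str)
  let upper_v := PySem.Str.upper v
  let st := known_makes.foldl (pvStep upper_v v) ("Unknown", v, -1)
  (pvToTitle st.1, pvToTitle st.2.1)

-- ===== PRECONDITION & SPEC =====
def Spec_parse_vehicle_split (vehicle_str : String) (known_makes : List String) (out : String × String) : Prop := out = parse_vehicle_split_alt vehicle_str known_makes
instance (vehicle_str : String) (known_makes : List String) (out : String × String) : Decidable (Spec_parse_vehicle_split vehicle_str known_makes out) := by unfold Spec_parse_vehicle_split; infer_instance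

-- ===== CLAIM (what is proved, stated in full; the proofs are below) =====
def Claim_equal_parse_vehicle_split : Prop := ∀ (vehicle_str : String) (known_makes : List String), Dom_parse_vehicle_split vehicle_str known_makes → Spec_parse_vehicle_split vehicle_str known_makes (parse_vehicle_split vehicle_str known_makes)

-- ===== LEMMAS AND PROOFS =====

theorem pvLen_nonneg (s : String) : 0 ≤ PySem.Str.len s := by
  simp [PySem.Str.len]

-- two equal-length prefixes of the same string are the same string
theorem pvStarts_unique {u a b : String} (ha : PySem.Str.startswith u a = true)
    (hb : PySem.Str.startswith u b = true) (h : PySem.Str.len a = PySem.Str.len b) : a = b := by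
  simp only [PySem.Str.startswith, PySem.Chars.startswith, List.isPrefixOf_iff_prefix] at ha hb
  simp only [PySem.Str.len, Int.natCast_inj] at h
  exact String.toList_inj.mp ((List.prefix_of_prefix_length_le ha hb (le_of_eq h)).eq_of_length h)

theorem pvStep_comm (u v : String) (a b : String) (st : String × String × Int) :
    pvStep u v (pvStep u v st a) b = pvStep u v (pvStep u v st b) a := by
  by_cases ha : PySem.Str.startswith u a = true
  · by_cases hb : PySem.Str.startswith u b = true
    · by_cases hab : PySem.Str.len a = PySem.Str.len b
      · have : a = b := pvStarts_unique ha hb hab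
        subst this; rfl
      · simp only [pvStep, ha, hb, and_true]
        split_ifs <;> simp_all <;> omega
    · simp only [pvStep, hb]
      simp
  · simp only [pvStep, ha]
    simp

theorem pvFoldl_stable {α β : Type} (f : β → α → β) (s : β) (l : List α)
    (h : ∀ x ∈ l, f s x = s) : l.foldl f s = s := by
  induction l with
  | nil => rfl
  | cons x t ih =>
    simp only [List.foldl_cons, h x (by simp)]
    exact ih (fun y hy => h y (by simp [hy]))

theorem pvFold_eq_find (u v : String) (sl : List String)
    (hp : sl.Pairwise (fun a b => PySem.Str.len b ≤ PySem.Str.len a)) :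
    ((sl.foldl (pvStep u v) ("Unknown", v, -1)).1,
     (sl.foldl (pvStep u v) ("Unknown", v, -1)).2.1) = pvFindMake u v sl := by
  induction sl with
  | nil => rfl
  | cons m rest ih =>
    rcases List.pairwise_cons.mp hp with ⟨hm, hrest⟩
    by_cases hs : PySem.Str.startswith u m = true
    · have h1 : pvStep u v ("Unknown", v, -1) m
          = (m, PySem.Str.strip (PySem.Str.slice v (some (PySem.Str.len m)) none), PySem.Str.len m) := by
        unfold pvStep
        rw [if_pos ⟨show (-1:Int) < PySem.Str.len m by have := pvLen_nonneg m; omega, hs⟩]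
      have h2 : rest.foldl (pvStep u v)
          (m, PySem.Str.strip (PySem.Str.slice v (some (PySem.Str.len m)) none), PySem.Str.len m)
          = (m, PySem.Str.strip (PySem.Str.slice v (some (PySem.Str.len m)) none), PySem.Str.len m) := by
        apply pvFoldl_stable
        intro x hx
        unfold pvStep
        rw [if_neg]
        rintro ⟨hlt, -⟩
        exact absurd hlt (not_lt.mpr (hm x hx))
      rw [List.foldl_cons, h1, h2]
      simp only [pvFindMake]
      rw [if_pos hs]
    · have h1 : pvStep u v ("Unknown", v, -1) m = ("Unknown", v, -1) := by
        unfold pvStep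
        rw [if_neg]
        rintro ⟨-, hss⟩
        exact hs hss
      rw [List.foldl_cons, h1, ih hrest]
      simp only [pvFindMake]
      rw [if_neg hs]

-- ===== VERDICT (by name: the statement is the Claim_ definition above) =====
theorem parse_vehicle_split_spec : Claim_equal_parse_vehicle_split := by
  intro vs km _
  unfold Spec_parse_vehicle_split parse_vehicle_split parse_vehicle_split_alt
  simp only
  set v := PySem.Str.strip (if vs == "" then "" else vs) with hv
  set u := PySem.Str.upper v with hu
  have hfold : km.foldl (pvStep u v) ("Unknown", v, -1)
      = (PySem.List.sorted km (fun m => PySem.Str.len m) true).foldl (pvStep u v) ("Unknown", v, -1) :=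
    List.Perm.foldl_eq' ((PySem.List.sorted_perm km _ true).symm)
      (fun x _ y _ z => pvStep_comm u v x y z) _
  have hmain := pvFold_eq_find u v _ (PySem.List.sorted_pairwise_rev km (fun m => PySem.Str.len m))
  rw [hfold, ← hmain]
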